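-- pv_equiv track=rewrite | github.com/taniasasaran/UBB-Computer-Science | Semester-1/FP/Labs/a1/p3.py | findPrimeOnPosition
-- ===== SOURCE A (Python) =====
-- def isPrime(number):
--     """
--     This function checks if a number is prime or not
--     """
--     if number < 2 or (number > 2 and number % 2 == 0):
--         return False
--     divisor = 3
--     while divisor * divisor <= number:
--         if number % divisor == 0:
--             return False
--         divisor += 2
--     return True
--
-- def primeDivisorsCounter(number):
--     """
--     This function counts the prime divisors of a given number
--     """
--     numberOfDivisors = 0
--     if isPrime(number) or number == 1:
--         return 1
--     if number % 2 == 0: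
--         numberOfDivisors += 1
--     i = 3
--     while i <= int(number / 2):
--         if number % i == 0 and isPrime(i):
--             numberOfDivisors += 1
--         i += 2
--     return numberOfDivisors
--
-- def kthPrimeDivisor(number, counter):
--     """
--     This function returns the prime number situated on the given position in an array
--     that contains divisors of the natural numbers
--         counter: the position
--         number: the given number
--     """
--     if number == 1:
--         return 1
--     if number % 2 == 0 and counter == 1:
--         return 2
--     if isPrime(number):
--         return number
--     if number % 2 == 0:
--         counter -= 1
--     for i in range(3, number, 2):
--         if number % i == 0 and isPrime(i):
--             counter -= 1
--         if counter == 0: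
--             return i
--
--     return -1
--
-- def findPrimeOnPosition(position):
--     i = 1
--     while position > 0:
--         position -= primeDivisorsCounter(i)
--         i += 1
--     i -= 1
--     newPosition = primeDivisorsCounter(i) + position
--     return kthPrimeDivisor(i, newPosition)
-- ===== SOURCE B (Python) =====
-- def _factorize(n):
--     """Distinct prime factors of n >= 2, ascending, by trial division to sqrt(n)."""
--     fs = []
--     d = 2
--     while d * d <= n:
--         if n % d == 0:
--             fs.append(d)
--             while n % d == 0:
--                 n //= d
--         d += 1
--     if n > 1:
--         fs.append(n)
--     return fs
--
-- def findPrimeOnPosition(position):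
--     if position <= 0:
--         return -1
--     n = 1
--     while True:
--         ds = [1] if n == 1 else _factorize(n)
--         if position <= len(ds):
--             return ds[position - 1]
--         position -= len(ds)
--         n += 1
-- ===== Notes on version B (the rewrite author's own statement) =====
-- stated objective: faster
-- what changed: Instead of counting prime divisors with an O(n) scan that calls a trial-division isPrime on every odd candidate up to n/2 and then re-scanning up to n to fetch the k-th one, B factorizes each number once by trial division up to sqrt(n), getting the ascending list of distinct prime factors directly and indexing into it.
-- intended difference: For position = 0 A returns 2 (an accident of primeDivisorsCounter(0)=1 feeding kthPrimeDivisor(0,1) into its even branch); B returns -1, the same not-found value A itself returns for every negative position, which is the intended answer for an out-of-range position. — e.g. on findPrimeOnPosition(0): A returns 2, B returns -1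
import Mathlib
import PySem

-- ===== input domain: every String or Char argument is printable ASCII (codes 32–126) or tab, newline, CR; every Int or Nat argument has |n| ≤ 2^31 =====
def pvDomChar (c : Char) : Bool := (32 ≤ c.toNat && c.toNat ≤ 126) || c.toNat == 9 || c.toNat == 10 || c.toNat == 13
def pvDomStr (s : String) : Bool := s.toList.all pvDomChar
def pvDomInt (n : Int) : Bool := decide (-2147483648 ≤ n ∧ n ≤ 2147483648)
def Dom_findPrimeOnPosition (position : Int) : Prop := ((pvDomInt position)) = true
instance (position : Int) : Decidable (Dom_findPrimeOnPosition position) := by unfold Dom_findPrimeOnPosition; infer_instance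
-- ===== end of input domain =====

-- B factorizes each number once by trial division to sqrt(n) instead of A's O(n) divisor scans
-- (a different algorithm; a timing run measures the speed-up). Intended difference (D_): see below.


-- ===== PORT A =====
def isPrimeLoopA (n d : Nat) : Bool :=
  if d * d ≤ n then (if n % d = 0 then false else isPrimeLoopA n (d + 2)) else true
termination_by n + 1 - d
decreasing_by
  rename_i h _
  rcases Nat.eq_zero_or_pos d with h0 | h0
  · omega
  · have hd : d ≤ d * d := Nat.le_mul_of_pos_left d h0
    omega
def isPrimeA (number : Nat) : Bool :=
  if number < 2 ∨ (number > 2 ∧ number % 2 = 0) then false else isPrimeLoopA number 3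

def pdcLoopA (n i bound : Nat) : Nat :=
  if i ≤ bound then (if n % i = 0 && isPrimeA i then 1 else 0) + pdcLoopA n (i + 2) bound else 0
termination_by bound + 1 - i

def pdcA (number : Nat) : Nat :=
  if isPrimeA number || number == 1 then 1
  else (if number % 2 = 0 then 1 else 0) + pdcLoopA number 3 (number / 2)

def kpdLoopA (n i : Nat) (counter : Int) : Int :=
  if i < n then
    let c' : Int := if n % i = 0 && isPrimeA i then counter - 1 else counter
    if c' = 0 then (i : Int) else kpdLoopA n (i + 2) c'
  else -1
termination_by n - i

def kpdA (number : Nat) (counter : Int) : Int :=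
  if number == 1 then 1
  else if number % 2 = 0 && counter == 1 then 2
  else if isPrimeA number then (number : Int)
  else kpdLoopA number 3 (if number % 2 = 0 then counter - 1 else counter)

-- the outer while of findPrimeOnPosition; fuel only makes the loop total (position drops by
-- pdcA i ≥ 1 each round, a fact proved below as Lst_len_pos/pdcA_eq, so fuel = position.toNat + 1 is never exhausted)
def aLoop (fuel : Nat) (position : Int) (i : Nat) : Int × Nat :=
  match fuel with
  | 0 => (position, i)
  | fuel + 1 =>
    if position > 0 then aLoop fuel (position - (pdcA i : Int)) (i + 1) else (position, i)

def findPrimeOnPosition (position : Int) : Int :=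
  let r := aLoop (position.toNat + 1) position 1
  let i := r.2 - 1
  kpdA i ((pdcA i : Int) + r.1)


-- ===== PORT B =====
def stripB (m d : Nat) : Nat :=
  if _h : 2 ≤ d ∧ m % d = 0 ∧ m ≠ 0 then stripB (m / d) d else m
termination_by m
decreasing_by exact Nat.div_lt_self (by omega) (by omega)

theorem stripB_le (m d : Nat) : stripB m d ≤ m := by
  unfold stripB
  split
  · exact le_trans (stripB_le (m / d) d) (Nat.div_le_self m d)
  · exact le_refl m
termination_by m
decreasing_by exact Nat.div_lt_self (by omega) (by omega)

def facLoopB (m d : Nat) (acc : List Nat) : List Nat :=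
  if h : d * d ≤ m ∧ 2 ≤ d then
    if m % d = 0 then facLoopB (stripB m d) (d + 1) (acc ++ [d])
    else facLoopB m (d + 1) acc
  else if m > 1 then acc ++ [m] else acc
termination_by m + 1 - d
decreasing_by
  · have h1 : 2 * d ≤ d * d := Nat.mul_le_mul_right d h.2
    have h2 := stripB_le m d
    omega
  · have h1 : 2 * d ≤ d * d := Nat.mul_le_mul_right d h.2
    omega

def facB (n : Nat) : List Nat := facLoopB n 2 []

-- B's outer while True loop; same fuel bound, never exhausted
def bLoop (fuel : Nat) (position : Int) (n : Nat) : Int :=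
  match fuel with
  | 0 => -1
  | fuel + 1 =>
    let ds : List Nat := if n = 1 then [1] else facB n
    if position ≤ (ds.length : Int) then
      match PySem.List.pyGet? ds (position - 1) with
      | some v => (v : Int)
      | none => -1
    else bLoop fuel (position - (ds.length : Int)) (n + 1)

def findPrimeOnPosition_alt (position : Int) : Int :=
  if position ≤ 0 then -1 else bLoop (position.toNat + 1) position 1


-- ===== PRECONDITION & SPEC =====
-- For position = 0 A returns 2 (an accident of primeDivisorsCounter(0)=1 feeding kthPrimeDivisor(0,1)
-- into its even branch); B returns -1, the same not-found value A itself returns for every negative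
-- position, which is the intended answer for an out-of-range position.
def D_findPrimeOnPosition (position : Int) : Prop := position = 0
instance (position : Int) : Decidable (D_findPrimeOnPosition position) := by unfold D_findPrimeOnPosition; infer_instance

def Spec_findPrimeOnPosition (position : Int) (out : Int) : Prop :=
  ¬ D_findPrimeOnPosition position → out = findPrimeOnPosition_alt position
instance (position : Int) (out : Int) : Decidable (Spec_findPrimeOnPosition position out) := by unfold Spec_findPrimeOnPosition; infer_instance

def pvDiffWitness_findPrimeOnPosition : Int := 0
def pvDiffWitnessOut_findPrimeOnPosition : Int × Int := (2, -1)

-- ===== CLAIM (what is proved, stated in full; the proofs are below) =====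
def Claim_unchanged_findPrimeOnPosition : Prop := ∀ (position : Int), Dom_findPrimeOnPosition position → Spec_findPrimeOnPosition position (findPrimeOnPosition position)
def Claim_changed_findPrimeOnPosition : Prop := Dom_findPrimeOnPosition (pvDiffWitness_findPrimeOnPosition) ∧ D_findPrimeOnPosition (pvDiffWitness_findPrimeOnPosition) ∧ findPrimeOnPosition (pvDiffWitness_findPrimeOnPosition) = pvDiffWitnessOut_findPrimeOnPosition.1 ∧ findPrimeOnPosition_alt (pvDiffWitness_findPrimeOnPosition) = pvDiffWitnessOut_findPrimeOnPosition.2 ∧ pvDiffWitnessOut_findPrimeOnPosition.1 ≠ pvDiffWitnessOut_findPrimeOnPosition.2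
def Claim_exact_findPrimeOnPosition : Prop := ∀ (position : Int), Dom_findPrimeOnPosition position → D_findPrimeOnPosition position → findPrimeOnPosition position ≠ findPrimeOnPosition_alt position

-- ===== LEMMAS AND PROOFS =====

theorem sortedLists_eq {l₁ l₂ : List Nat} (h₁ : l₁.Pairwise (· < ·)) (h₂ : l₂.Pairwise (· < ·))
    (hm : ∀ x, x ∈ l₁ ↔ x ∈ l₂) : l₁ = l₂ :=
  List.Perm.eq_of_pairwise (fun a b _ _ h h' => by omega) h₁ h₂
    ((List.perm_ext_iff_of_nodup (h₁.nodup) (h₂.nodup)).mpr hm)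

-- the trial loop: true iff no m ≥ d of d's parity with m*m ≤ n divides n
theorem isPrimeLoopA_eq (n d : Nat) :
    isPrimeLoopA n d = true ↔ ∀ m, d ≤ m → m % 2 = d % 2 → m * m ≤ n → ¬ (m ∣ n) := by
  rw [isPrimeLoopA]
  split
  · rename_i hdd
    split
    · rename_i hmod
      simp only [Bool.false_eq_true, false_iff]
      intro hall
      exact (hall d le_rfl rfl hdd) (Nat.dvd_of_mod_eq_zero hmod)
    · rename_i hmod
      rw [isPrimeLoopA_eq n (d + 2)]
      constructor
      · intro hall m hdm hpar hsq
        rcases Nat.lt_or_ge m (d + 2) with hlt | hge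
        · have hcase : m = d ∨ m = d + 1 := by omega
          rcases hcase with rfl | rfl
          · intro hdvd
            exact hmod (Nat.mod_eq_zero_of_dvd hdvd)
          · omega
        · exact hall m hge (by omega) hsq
      · intro hall m hdm hpar hsq
        exact hall m (by omega) (by omega) hsq
  · rename_i hdd
    constructor
    · intro _ m hdm hpar hsq hdvd
      have : d * d ≤ m * m := Nat.mul_le_mul hdm hdm
      omega
    · intro _; rfl
termination_by n + 1 - d
decreasing_by
  rcases Nat.eq_zero_or_pos d with h0 | h0
  · omega
  · rename_i hdd _
    have hd : d ≤ d * d := Nat.le_mul_of_pos_left d h0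
    omega

theorem isPrimeA_iff (n : Nat) : isPrimeA n = true ↔ n.Prime := by
  unfold isPrimeA
  split
  · rename_i h
    simp only [Bool.false_eq_true, false_iff]
    rcases h with h | h
    · intro hp; exact absurd hp.two_le (by omega)
    · intro hp
      rcases hp.eq_one_or_self_of_dvd 2 (Nat.dvd_of_mod_eq_zero h.2) with h2 | h2 <;> omega
  · rename_i h
    push Not at h
    rw [isPrimeLoopA_eq]
    constructor
    · intro hall
      by_contra hnp
      have h2 : 2 ≤ n := h.1
      rcases Nat.lt_or_ge n 3 with h3 | h3
      · have : n = 2 := by omega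
        subst this; exact hnp Nat.prime_two
      · have hodd : n % 2 = 1 := by
          rcases Nat.mod_two_eq_zero_or_one n with he | ho
          · exact absurd he (h.2 (by omega))
          · exact ho
        have hpp : n.minFac.Prime := Nat.minFac_prime (by omega)
        have hpd : n.minFac ∣ n := Nat.minFac_dvd n
        have hsq : n.minFac * n.minFac ≤ n := by
          have := Nat.minFac_sq_le_self (by omega) hnp
          simpa [pow_two] using this
        have hpodd : n.minFac % 2 = 1 := by
          rcases Nat.mod_two_eq_zero_or_one n.minFac with he | ho
          · exfalso
            have h2n : (2 : Nat) ∣ n := (Nat.dvd_of_mod_eq_zero he).trans hpd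
            rcases h2n with ⟨k, hk⟩; omega
          · exact ho
        have hp3 : 3 ≤ n.minFac := by have := hpp.two_le; omega
        exact hall n.minFac hp3 (by omega) hsq hpd
    · intro hp m h3m hpar hsq hdvd
      have hmn : m < n := by nlinarith
      rcases hp.eq_one_or_self_of_dvd m hdvd with h1 | h1 <;> omega

-- the ascending list of distinct prime factors, as a filtered range
def PF (n : Nat) : List Nat := (List.range (n + 1)).filter (fun p => decide (p.Prime ∧ p ∣ n))

theorem PF_pairwise (n : Nat) : (PF n).Pairwise (· < ·) :=
  List.Pairwise.filter _ List.pairwise_lt_range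

theorem mem_PF {n p : Nat} (hn : 1 ≤ n) : p ∈ PF n ↔ p.Prime ∧ p ∣ n := by
  unfold PF
  simp only [List.mem_filter, List.mem_range, decide_eq_true_eq]
  constructor
  · exact fun h => h.2
  · intro h
    exact ⟨by have := Nat.le_of_dvd (by omega) h.2; omega, h⟩

theorem PF_one : PF 1 = [] := by decide

theorem PF_prime {n : Nat} (hp : n.Prime) : PF n = [n] := by
  refine sortedLists_eq (PF_pairwise n) (by simp) ?_
  intro x
  rw [mem_PF (by have := hp.two_le; omega)]
  simp only [List.mem_singleton]
  constructor
  · rintro ⟨hx, hd⟩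
    rcases hp.eq_one_or_self_of_dvd x hd with h1 | h1
    · exact absurd h1 hx.one_lt.ne'
    · exact h1
  · rintro rfl; exact ⟨hp, dvd_rfl⟩

theorem stripB_pos {m d : Nat} (hm : 1 ≤ m) : 1 ≤ stripB m d := by
  unfold stripB
  split
  · rename_i h
    have hd : d ∣ m := Nat.dvd_of_mod_eq_zero h.2.1
    exact stripB_pos (Nat.one_le_div_iff (by omega) |>.mpr (Nat.le_of_dvd hm hd))
  · exact hm
termination_by m
decreasing_by exact Nat.div_lt_self (by omega) (by omega)

theorem stripB_not_dvd {m d : Nat} (hd : 2 ≤ d) (hm : 1 ≤ m) : ¬ d ∣ stripB m d := by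
  unfold stripB
  split
  · rename_i h
    have hdm : d ∣ m := Nat.dvd_of_mod_eq_zero h.2.1
    exact stripB_not_dvd hd (Nat.one_le_div_iff (by omega) |>.mpr (Nat.le_of_dvd hm hdm))
  · rename_i h
    intro hdvd
    exact h ⟨hd, Nat.mod_eq_zero_of_dvd hdvd, by omega⟩
termination_by m
decreasing_by exact Nat.div_lt_self (by omega) (by omega)

theorem stripB_dvd (m d : Nat) : stripB m d ∣ m := by
  unfold stripB
  split
  · rename_i h
    exact (stripB_dvd (m / d) d).trans (Nat.div_dvd_of_dvd (Nat.dvd_of_mod_eq_zero h.2.1))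
  · exact dvd_rfl
termination_by m
decreasing_by exact Nat.div_lt_self (by omega) (by omega)

theorem stripB_prime_dvd {m d p : Nat} (hp : p.Prime) (hdp : d.Prime) (hne : p ≠ d) :
    p ∣ m → p ∣ stripB m d := by
  intro hpm
  unfold stripB
  split
  · rename_i h
    have hdm : d ∣ m := Nat.dvd_of_mod_eq_zero h.2.1
    apply stripB_prime_dvd hp hdp hne
    -- p ∣ m = (m/d) * d, p prime, p ≠ d ⇒ p ∣ m/d
    have hmd : m = m / d * d := (Nat.div_mul_cancel hdm).symm
    have : p ∣ m / d * d := hmd ▸ hpm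
    rcases (Nat.Prime.dvd_mul hp).mp this with h1 | h1
    · exact h1
    · exact absurd ((Nat.prime_dvd_prime_iff_eq hp hdp).mp h1) hne
  · exact hpm
termination_by m
decreasing_by exact Nat.div_lt_self (by omega) (by omega)

theorem facLoopB_eq (m d : Nat) (acc : List Nat) : 2 ≤ d → 1 ≤ m →
    (∀ p, p.Prime → p ∣ m → d ≤ p) → facLoopB m d acc = acc ++ PF m := by
  induction m, d, acc using facLoopB.induct with
  | case1 m d acc hG hmod IH =>
    intro hd hm hfac
    have hdm : d ∣ m := Nat.dvd_of_mod_eq_zero hmod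
    have hdp : d.Prime := by
      have h1 : d.minFac.Prime := Nat.minFac_prime (by omega)
      have h2 : d.minFac ∣ m := (Nat.minFac_dvd d).trans hdm
      have h3 : d ≤ d.minFac := hfac _ h1 h2
      have h4 : d.minFac ≤ d := Nat.minFac_le (by omega)
      have h5 : d.minFac = d := le_antisymm h4 h3
      exact h5 ▸ h1
    have hm' : 1 ≤ stripB m d := stripB_pos hm
    have hfac' : ∀ p, p.Prime → p ∣ stripB m d → d + 1 ≤ p := by
      intro p hp hpd
      have h6 : d ≤ p := hfac p hp (hpd.trans (stripB_dvd m d))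
      rcases Nat.lt_or_ge d p with h7 | h7
      · omega
      · exfalso
        have h8 : p = d := by omega
        exact stripB_not_dvd hd hm (h8 ▸ hpd)
    rw [facLoopB, dif_pos hG, if_pos hmod]
    rw [IH (by omega) hm' hfac', List.append_assoc]
    congr 1
    refine sortedLists_eq ?_ (PF_pairwise m) ?_
    · simp only [List.singleton_append]
      refine List.pairwise_cons.mpr ⟨?_, PF_pairwise _⟩
      intro p hp
      have h9 := (mem_PF hm').mp hp
      have := hfac' p h9.1 h9.2
      omega
    · intro x
      simp only [List.singleton_append, List.mem_cons]
      rw [mem_PF hm', mem_PF hm]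
      constructor
      · rintro (rfl | ⟨hx, hxd⟩)
        · exact ⟨hdp, hdm⟩
        · exact ⟨hx, hxd.trans (stripB_dvd m d)⟩
      · rintro ⟨hx, hxd⟩
        by_cases hxeq : x = d
        · exact Or.inl hxeq
        · exact Or.inr ⟨hx, stripB_prime_dvd hx hdp hxeq hxd⟩
  | case2 m d acc hG hmod IH =>
    intro hd hm hfac
    rw [facLoopB, dif_pos hG, if_neg hmod]
    refine IH (by omega) hm ?_
    intro p hp hpd
    have h6 : d ≤ p := hfac p hp hpd
    rcases Nat.lt_or_ge d p with h7 | h7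
    · omega
    · exfalso
      have h8 : p = d := by omega
      exact hmod (Nat.mod_eq_zero_of_dvd (h8 ▸ hpd))
  | case3 m d acc hG hm1 =>
    intro hd hm hfac
    have hdd : m < d * d := by omega
    rw [facLoopB, dif_neg hG, if_pos hm1]
    have hmp : m.Prime := by
      by_contra hnp
      have h1 : m.minFac.Prime := Nat.minFac_prime (by omega)
      have h2 : m.minFac ∣ m := Nat.minFac_dvd m
      have h3 : d ≤ m.minFac := hfac _ h1 h2
      have h4 : m.minFac * m.minFac ≤ m := by
        have := Nat.minFac_sq_le_self (by omega) hnp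
        simpa [pow_two] using this
      have h5 : d * d ≤ m.minFac * m.minFac := Nat.mul_le_mul h3 h3
      omega
    rw [PF_prime hmp]
  | case4 m d acc hG hm1 =>
    intro hd hm hfac
    have hm' : m = 1 := by omega
    subst hm'
    rw [facLoopB, dif_neg hG, if_neg hm1, PF_one, List.append_nil]

theorem facB_eq {n : Nat} (hn : 2 ≤ n) : facLoopB n 2 [] = PF n := by
  rw [facLoopB_eq n 2 [] le_rfl (by omega) (fun p hp _ => hp.two_le), List.nil_append]

-- the odd prime divisors of n that are ≥ i, ascending
def OL (n i : Nat) : List Nat :=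
  (List.range n).filter (fun p => decide (i ≤ p ∧ p % 2 = 1 ∧ p.Prime ∧ p ∣ n))

theorem OL_pairwise (n i : Nat) : (OL n i).Pairwise (· < ·) :=
  List.Pairwise.filter _ List.pairwise_lt_range

theorem mem_OL {n i p : Nat} : p ∈ OL n i ↔ p < n ∧ i ≤ p ∧ p % 2 = 1 ∧ p.Prime ∧ p ∣ n := by
  unfold OL
  simp only [List.mem_filter, List.mem_range, decide_eq_true_eq]

theorem OL_step {n i : Nat} (hodd : i % 2 = 1) :
    OL n i = if i < n ∧ i.Prime ∧ i ∣ n then i :: OL n (i + 2) else OL n (i + 2) := by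
  split
  · rename_i hc
    refine sortedLists_eq (OL_pairwise n i) ?_ ?_
    · refine List.pairwise_cons.mpr ⟨?_, OL_pairwise _ _⟩
      intro p hp
      have := mem_OL.mp hp
      omega
    · intro x
      simp only [List.mem_cons, mem_OL]
      constructor
      · rintro ⟨h1, h2, h3, h4, h5⟩
        by_cases hx : x = i
        · exact Or.inl hx
        · exact Or.inr ⟨h1, by omega, h3, h4, h5⟩
      · rintro (rfl | ⟨h1, h2, h3, h4, h5⟩)
        · exact ⟨hc.1, le_rfl, hodd, hc.2.1, hc.2.2⟩
        · exact ⟨h1, by omega, h3, h4, h5⟩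
  · rename_i hc
    refine sortedLists_eq (OL_pairwise n i) (OL_pairwise n _) ?_
    intro x
    simp only [mem_OL]
    constructor
    · rintro ⟨h1, h2, h3, h4, h5⟩
      by_cases hx : x = i
      · exact absurd ⟨hx ▸ h1, hx ▸ h4, hx ▸ h5⟩ hc
      · exact ⟨h1, by omega, h3, h4, h5⟩
    · rintro ⟨h1, h2, h3, h4, h5⟩
      exact ⟨h1, by omega, h3, h4, h5⟩

theorem kpdLoopA_eq {n : Nat} : ∀ (i : Nat) (counter : Int) (j : Nat), counter = (j : Int) + 1 →
    i % 2 = 1 → j < (OL n i).length → kpdLoopA n i counter = ((OL n i).getD j 0 : Int) := by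
  intro i counter
  induction i, counter using kpdLoopA.induct (n := n) with
  | case1 i counter hlt c' hc0 =>
    intro j hj hodd hlen
    have hc0' : (if (decide (n % i = 0) && isPrimeA i) = true then counter - 1 else counter) = 0 := hc0
    rw [kpdLoopA, if_pos hlt]
    simp only
    cases hq : (decide (n % i = 0) && isPrimeA i) with
    | false =>
      simp only [hq] at hc0'
      simp at hc0'
      omega
    | true =>
      simp only [hq] at hc0' ⊢
      simp only [if_true] at hc0' ⊢
      rw [if_pos hc0']
      have hj0 : j = 0 := by omega
      subst hj0
      have hiq : i < n ∧ i.Prime ∧ i ∣ n := by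
        rw [Bool.and_eq_true] at hq
        exact ⟨hlt, (isPrimeA_iff i).mp hq.2,
          Nat.dvd_of_mod_eq_zero (by simpa using hq.1)⟩
      rw [OL_step hodd, if_pos hiq]
      simp
  | case2 i counter hlt c' hcne IH =>
    intro j hj hodd hlen
    have hcne' : ¬ (if (decide (n % i = 0) && isPrimeA i) = true then counter - 1 else counter) = 0 := hcne
    have IH' : ∀ (j : Nat),
        (if (decide (n % i = 0) && isPrimeA i) = true then counter - 1 else counter) = (j : Int) + 1 →
        (i + 2) % 2 = 1 → j < (OL n (i + 2)).length →
        kpdLoopA n (i + 2) (if (decide (n % i = 0) && isPrimeA i) = true then counter - 1 else counter)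
          = ((OL n (i + 2)).getD j 0 : Int) := IH
    rw [kpdLoopA, if_pos hlt]
    simp only
    cases hq : (decide (n % i = 0) && isPrimeA i) with
    | false =>
      simp only [hq, if_false, Bool.false_eq_true] at hcne' IH' ⊢
      rw [if_neg hcne']
      have hOL : OL n i = OL n (i + 2) := by
        rw [OL_step hodd]
        split
        · rename_i hiq
          exfalso
          rw [Bool.and_eq_false_iff] at hq
          rcases hq with hq | hq
          · simp only [decide_eq_false_iff_not] at hq
            exact hq (Nat.mod_eq_zero_of_dvd hiq.2.2)
          · exact absurd ((isPrimeA_iff i).mpr hiq.2.1) (by simp [hq])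
        · rfl
      rw [hOL] at hlen ⊢
      exact IH' j hj (by omega) hlen
    | true =>
      simp only [hq, if_true] at hcne' IH' ⊢
      rw [if_neg hcne']
      have hiq : i < n ∧ i.Prime ∧ i ∣ n := by
        rw [Bool.and_eq_true] at hq
        exact ⟨hlt, (isPrimeA_iff i).mp hq.2,
          Nat.dvd_of_mod_eq_zero (by simpa using hq.1)⟩
      have hOL : OL n i = i :: OL n (i + 2) := by rw [OL_step hodd, if_pos hiq]
      have hj1 : 1 ≤ j := by by_contra h; exact hcne' (by omega)
      have hlen' : j - 1 < (OL n (i + 2)).length := by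
        rw [hOL] at hlen; simp only [List.length_cons] at hlen; omega
      rw [IH' (j - 1) (by omega) (by omega) hlen', hOL]
      rcases Nat.exists_eq_add_of_le hj1 with ⟨k, hk⟩
      subst hk
      simp [Nat.add_comm]
  | case3 i counter hge =>
    intro j hj hodd hlen
    exfalso
    have hOLnil : OL n i = [] := by
      rw [List.eq_nil_iff_forall_not_mem]
      intro x hx
      have := mem_OL.mp hx
      omega
    rw [hOLnil] at hlen
    simp at hlen

-- the odd prime divisors of n that are ≥ i and ≤ b, ascending (pdc's loop range)
def OB (n b i : Nat) : List Nat :=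
  (List.range (b + 1)).filter (fun p => decide (i ≤ p ∧ p % 2 = 1 ∧ p.Prime ∧ p ∣ n))

theorem OB_pairwise (n b i : Nat) : (OB n b i).Pairwise (· < ·) :=
  List.Pairwise.filter _ List.pairwise_lt_range

theorem mem_OB {n b i p : Nat} : p ∈ OB n b i ↔ p ≤ b ∧ i ≤ p ∧ p % 2 = 1 ∧ p.Prime ∧ p ∣ n := by
  unfold OB
  simp only [List.mem_filter, List.mem_range, decide_eq_true_eq, Nat.lt_succ_iff]

theorem OB_step {n b i : Nat} (hodd : i % 2 = 1) :
    OB n b i = if i ≤ b ∧ i.Prime ∧ i ∣ n then i :: OB n b (i + 2) else OB n b (i + 2) := by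
  split
  · rename_i hc
    refine sortedLists_eq (OB_pairwise n b i) ?_ ?_
    · refine List.pairwise_cons.mpr ⟨?_, OB_pairwise _ _ _⟩
      intro p hp
      have := mem_OB.mp hp
      omega
    · intro x
      simp only [List.mem_cons, mem_OB]
      constructor
      · rintro ⟨h1, h2, h3, h4, h5⟩
        by_cases hx : x = i
        · exact Or.inl hx
        · exact Or.inr ⟨h1, by omega, h3, h4, h5⟩
      · rintro (rfl | ⟨h1, h2, h3, h4, h5⟩)
        · exact ⟨hc.1, le_rfl, hodd, hc.2.1, hc.2.2⟩
        · exact ⟨h1, by omega, h3, h4, h5⟩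
  · rename_i hc
    refine sortedLists_eq (OB_pairwise n b i) (OB_pairwise n b _) ?_
    intro x
    simp only [mem_OB]
    constructor
    · rintro ⟨h1, h2, h3, h4, h5⟩
      by_cases hx : x = i
      · exact absurd ⟨hx ▸ h1, hx ▸ h4, hx ▸ h5⟩ hc
      · exact ⟨h1, by omega, h3, h4, h5⟩
    · rintro ⟨h1, h2, h3, h4, h5⟩
      exact ⟨h1, by omega, h3, h4, h5⟩

theorem pdcLoopA_eq {n b : Nat} : ∀ i, i % 2 = 1 → pdcLoopA n i b = (OB n b i).length := by
  intro i
  induction i using pdcLoopA.induct (bound := b) with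
  | case1 i hle IH =>
    intro hodd
    rw [pdcLoopA, if_pos hle, IH (by omega), OB_step hodd]
    cases hq : (decide (n % i = 0) && isPrimeA i) with
    | false =>
      have hside : ¬ (i ≤ b ∧ i.Prime ∧ i ∣ n) := by
        rw [Bool.and_eq_false_iff] at hq
        rintro ⟨h1, h2, h3⟩
        rcases hq with hq | hq
        · simp only [decide_eq_false_iff_not] at hq
          exact hq (Nat.mod_eq_zero_of_dvd h3)
        · exact absurd ((isPrimeA_iff i).mpr h2) (by simp [hq])
      rw [if_neg hside]
      simp
    | true =>
      have hq' := hq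
      rw [Bool.and_eq_true] at hq'
      simp only [hq, if_true]
      rw [if_pos ⟨hle, (isPrimeA_iff i).mp hq'.2, Nat.dvd_of_mod_eq_zero (by simpa using hq'.1)⟩]
      simp [Nat.add_comm]
  | case2 i hgt =>
    intro hodd
    rw [pdcLoopA, if_neg hgt]
    have hnil : OB n b i = [] := by
      rw [List.eq_nil_iff_forall_not_mem]
      intro x hx
      have := mem_OB.mp hx
      omega
    rw [hnil]
    rfl

-- the divisor list each number contributes to the global sequence
def Lst (n : Nat) : List Nat := if n = 1 then [1] else PF n

theorem dvd_le_half {n p : Nat} (hp : p ∣ n) (hlt : p < n) (hn : 1 ≤ n) : p ≤ n / 2 := by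
  rcases hp with ⟨k, hk⟩
  have hk2 : 2 ≤ k := by
    rcases Nat.lt_or_ge k 2 with h | h
    · interval_cases k <;> omega
    · exact h
  have : p * 2 ≤ n := by calc p * 2 ≤ p * k := Nat.mul_le_mul_left p hk2
                              _ = n := hk.symm
  omega

theorem PF_split {n : Nat} (h2 : 2 ≤ n) (hnp : ¬ n.Prime) :
    PF n = (if n % 2 = 0 then [2] else []) ++ OL n 3 := by
  refine sortedLists_eq (PF_pairwise n) ?_ ?_
  · split
    · refine List.pairwise_cons.mpr ⟨?_, OL_pairwise _ _⟩
      intro p hp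
      have := mem_OL.mp hp
      omega
    · simpa using OL_pairwise n 3
  · intro x
    rw [mem_PF (by omega)]
    constructor
    · rintro ⟨hx, hxd⟩
      by_cases hx2 : x = 2
      · subst hx2
        have he : n % 2 = 0 := Nat.mod_eq_zero_of_dvd hxd
        simp [he]
      · have hodd : x % 2 = 1 := by
          rcases Nat.mod_two_eq_zero_or_one x with h | h
          · exfalso
            have hdx : (2 : Nat) ∣ x := Nat.dvd_of_mod_eq_zero h
            exact hx2 ((Nat.prime_dvd_prime_iff_eq Nat.prime_two hx).mp hdx).symm
          · exact h
        have hx3 : 3 ≤ x := by have := hx.two_le; omega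
        have hxn : x < n := by
          rcases Nat.lt_or_ge x n with h | h
          · exact h
          · have := Nat.le_of_dvd (by omega) hxd
            have hxe : x = n := by omega
            exact absurd (hxe ▸ hx) hnp
        have : x ∈ OL n 3 := mem_OL.mpr ⟨hxn, hx3, hodd, hx, hxd⟩
        simp [List.mem_append, this]
    · intro hx
      rw [List.mem_append] at hx
      rcases hx with hx | hx
      · have hx2 : x = 2 ∧ n % 2 = 0 := by
          split at hx
          · simp at hx; rename_i h; exact ⟨hx, h⟩
          · simp at hx
        exact ⟨hx2.1 ▸ Nat.prime_two, hx2.1 ▸ Nat.dvd_of_mod_eq_zero hx2.2⟩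
      · have := mem_OL.mp hx
        exact ⟨this.2.2.2.1, this.2.2.2.2⟩

-- OB at bound n/2 captures every odd prime divisor of a composite n
theorem OB_half_eq_OL {n : Nat} (h2 : 2 ≤ n) : OB n (n / 2) 3 = OL n 3 := by
  refine sortedLists_eq (OB_pairwise n _ 3) (OL_pairwise n 3) ?_
  intro x
  rw [mem_OB, mem_OL]
  constructor
  · rintro ⟨h1, h3, h4, h5, h6⟩
    exact ⟨by omega, h3, h4, h5, h6⟩
  · rintro ⟨h1, h3, h4, h5, h6⟩
    exact ⟨dvd_le_half h6 h1 (by omega), h3, h4, h5, h6⟩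

theorem pdcA_eq {n : Nat} (hn : 1 ≤ n) : pdcA n = (Lst n).length := by
  unfold pdcA Lst
  by_cases h1 : n = 1
  · simp [h1, isPrimeA]
  · rw [if_neg h1]
    by_cases hp : n.Prime
    · rw [if_pos (by simp [(isPrimeA_iff n).mpr hp]), PF_prime hp]
      rfl
    · have h2 : 2 ≤ n := by omega
      rw [if_neg (by
        simp only [Bool.or_eq_true, beq_iff_eq]
        rintro (hc | hc)
        · exact absurd ((isPrimeA_iff n).mp hc) hp
        · exact h1 hc)]
      rw [pdcLoopA_eq 3 (by omega), OB_half_eq_OL h2, PF_split h2 hp]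
      rw [List.length_append]
      split <;> simp

theorem kpdA_eq {n : Nat} (hn : 1 ≤ n) (j : Nat) (hj : j < (Lst n).length) :
    kpdA n ((j : Int) + 1) = ((Lst n).getD j 0 : Int) := by
  have hLst : Lst n = if n = 1 then [1] else PF n := rfl
  unfold kpdA
  by_cases h1 : n = 1
  · subst h1
    have hj0 : j = 0 := by simpa [Lst] using hj
    subst hj0
    simp [Lst]
  · rw [if_neg (by simpa using h1)]
    rw [hLst, if_neg h1] at hj
    rw [hLst, if_neg h1]
    by_cases hp : n.Prime
    · rw [PF_prime hp] at hj ⊢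
      have hj0 : j = 0 := by simpa using hj
      subst hj0
      by_cases he : n % 2 = 0
      · have hn2 : n = 2 := by
          have hdx : (2 : Nat) ∣ n := Nat.dvd_of_mod_eq_zero he
          exact ((Nat.prime_dvd_prime_iff_eq Nat.prime_two hp).mp hdx).symm
        subst hn2
        simp
      · rw [if_neg (by simp [he]), if_pos ((isPrimeA_iff n).mpr hp)]
        simp
    · have h2 : 2 ≤ n := by omega
      have hsplit := PF_split h2 hp
      rw [hsplit] at hj ⊢
      by_cases he : n % 2 = 0
      · rw [if_pos he] at hj
        by_cases hj0 : j = 0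
        · subst hj0
          simp [he]
        · rw [if_neg (by simp; omega)]
          rw [if_neg (fun hc => absurd ((isPrimeA_iff n).mp hc) hp)]
          rw [if_pos he, if_pos he]
          have hlen : j - 1 < (OL n 3).length := by
            simp only [List.length_append, List.length_cons, List.length_nil] at hj
            omega
          have hk := kpdLoopA_eq (n := n) 3 ((j : Int) + 1 - 1) (j - 1) (by omega) (by omega) hlen
          rw [hk]
          rcases Nat.exists_eq_add_of_le (Nat.one_le_iff_ne_zero.mpr hj0) with ⟨k, hk2⟩
          subst hk2
          simp [Nat.add_comm]
      · rw [if_neg he] at hj ⊢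
        rw [if_neg (by simp [he])]
        rw [if_neg (fun hc => absurd ((isPrimeA_iff n).mp hc) hp)]
        rw [if_neg he]
        have hlen : j < (OL n 3).length := by simpa using hj
        have hk := kpdLoopA_eq (n := n) 3 ((j : Int) + 1) j rfl (by omega) hlen
        rw [hk]
        simp

theorem Lst_len_pos {n : Nat} (hn : 1 ≤ n) : 1 ≤ (Lst n).length := by
  unfold Lst
  split
  · simp
  · have h2 : 2 ≤ n := by omega
    have hmem : n.minFac ∈ PF n := (mem_PF (by omega)).mpr
      ⟨Nat.minFac_prime (by omega), Nat.minFac_dvd n⟩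
    have := List.length_pos_of_mem hmem
    omega

theorem aLoop_nonpos {fuel : Nat} {pos : Int} {i : Nat} (h : pos ≤ 0) :
    aLoop fuel pos i = (pos, i) := by
  cases fuel with
  | zero => rfl
  | succ fuel => rw [aLoop, if_neg (by omega)]

def postA (r : Int × Nat) : Int :=
  kpdA (r.2 - 1) ((pdcA (r.2 - 1) : Int) + r.1)

theorem loop_eq : ∀ (fuel : Nat) (pos : Int) (i : Nat), 1 ≤ i → 1 ≤ pos → pos ≤ (fuel : Int) →
    postA (aLoop fuel pos i) = bLoop fuel pos i := by
  intro fuel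
  induction fuel with
  | zero => intro pos i _ h2 h3; omega
  | succ fuel IH =>
    intro pos i hi hpos hfuel
    have hcA : pdcA i = (Lst i).length := pdcA_eq hi
    have hlp : 1 ≤ (Lst i).length := Lst_len_pos hi
    have hds : (if i = 1 then [1] else facB i) = Lst i := by
      unfold Lst facB
      split
      · rfl
      · exact facB_eq (by omega)
    rw [aLoop, if_pos (by omega), bLoop]
    simp only [hds]
    by_cases hle : pos ≤ ((Lst i).length : Int)
    · rw [if_pos hle]
      have hA : aLoop fuel (pos - (pdcA i : Int)) (i + 1) = (pos - (pdcA i : Int), i + 1) :=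
        aLoop_nonpos (by omega)
      rw [hA]
      unfold postA
      simp only [Nat.add_sub_cancel]
      have hpos' : (pdcA i : Int) + (pos - (pdcA i : Int)) = pos := by ring
      rw [hpos']
      -- pos = j + 1 with j < length
      set j : Nat := (pos - 1).toNat with hjdef
      have hjpos : pos = (j : Int) + 1 := by omega
      have hjlt : j < (Lst i).length := by omega
      rw [hjpos, kpdA_eq hi j hjlt]
      have hget : PySem.List.pyGet? (Lst i) ((j : Int) + 1 - 1) = (Lst i)[j]? := by
        rw [show ((j : Int) + 1 - 1) = (j : Int) by ring]
        exact PySem.List.pyGet?_natCast (Lst i) j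
      rw [hget, List.getElem?_eq_getElem hjlt]
      simp [List.getD_eq_getElem?_getD, List.getElem?_eq_getElem hjlt]
    · rw [if_neg hle]
      rw [hcA]
      exact IH (pos - ((Lst i).length : Int)) (i + 1) (by omega) (by omega) (by omega)

theorem main_pos {position : Int} (h : 1 ≤ position) :
    findPrimeOnPosition position = findPrimeOnPosition_alt position := by
  unfold findPrimeOnPosition findPrimeOnPosition_alt
  rw [if_neg (by omega)]
  exact loop_eq (position.toNat + 1) position 1 le_rfl h (by omega)

theorem main_neg {position : Int} (h : position < 0) :
    findPrimeOnPosition position = -1 := by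
  unfold findPrimeOnPosition
  rw [aLoop_nonpos (by omega)]
  simp only
  have hpdc0 : pdcA 0 = 1 := by
    rw [pdcA, pdcLoopA]
    simp [isPrimeA]
  rw [hpdc0, kpdA]
  rw [if_neg (by simp), if_neg (by simp; omega), if_neg (by simp [isPrimeA]), kpdLoopA]
  simp

theorem A_at_zero : findPrimeOnPosition 0 = 2 := by
  simp [findPrimeOnPosition, aLoop, kpdA, pdcA, isPrimeA, pdcLoopA]

theorem B_at_zero : findPrimeOnPosition_alt 0 = -1 := by
  simp [findPrimeOnPosition_alt]

-- ===== VERDICT (by name: the statement is the Claim_ definition above) =====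
theorem findPrimeOnPosition_spec : Claim_unchanged_findPrimeOnPosition := by
  unfold Claim_unchanged_findPrimeOnPosition
  intro position _ hD
  rcases lt_trichotomy position 0 with h | h | h
  · rw [main_neg h]
    unfold findPrimeOnPosition_alt
    rw [if_pos (by omega)]
  · exact absurd h hD
  · exact main_pos (by omega)
theorem findPrimeOnPosition_changed : Claim_changed_findPrimeOnPosition := by
  unfold Claim_changed_findPrimeOnPosition
  refine ⟨by decide, by decide, A_at_zero, B_at_zero, by decide⟩
theorem findPrimeOnPosition_tight : Claim_exact_findPrimeOnPosition := by
  unfold Claim_exact_findPrimeOnPosition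
  intro p _ hD
  rw [show p = 0 from hD, A_at_zero, B_at_zero]
  decide
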